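-- pv_equiv track=rewrite | github.com/xiaoguangdong/Sage | scripts/data/policy/policy_signal_pipeline.py | extract_industries
-- ===== SOURCE A (Python) =====
-- from typing import Dict, List, Optional, Tuple
--
-- def extract_industries(text: str, mapping: Dict[str, List[str]]) -> List[str]:
--     if not text:
--         return []
--     found = []
--     for industry, keywords in mapping.items():
--         if any(k in text for k in keywords):
--             found.append(industry)
--     return found
-- ===== SOURCE B (Python) =====
-- def extract_industries(text, mapping):
--     if not text:
--         return []
--     # test each DISTINCT keyword against the text exactly once, then select
--     # industries by set membership instead of repeating substring searches
--     distinct = dict.fromkeys(k for ks in mapping.values() for k in ks)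
--     hit = {k for k in distinct if k in text}
--     return [ind for ind, ks in mapping.items() if any(k in hit for k in ks)]
-- ===== Notes on version B (the rewrite author's own statement) =====
-- stated objective: alternative
-- what changed: B first deduplicates all keywords and runs each distinct keyword's substring test exactly once, building a set of matched keywords, then selects industries by set membership; A re-runs the substring search per industry with short-circuit.
import Mathlib
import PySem

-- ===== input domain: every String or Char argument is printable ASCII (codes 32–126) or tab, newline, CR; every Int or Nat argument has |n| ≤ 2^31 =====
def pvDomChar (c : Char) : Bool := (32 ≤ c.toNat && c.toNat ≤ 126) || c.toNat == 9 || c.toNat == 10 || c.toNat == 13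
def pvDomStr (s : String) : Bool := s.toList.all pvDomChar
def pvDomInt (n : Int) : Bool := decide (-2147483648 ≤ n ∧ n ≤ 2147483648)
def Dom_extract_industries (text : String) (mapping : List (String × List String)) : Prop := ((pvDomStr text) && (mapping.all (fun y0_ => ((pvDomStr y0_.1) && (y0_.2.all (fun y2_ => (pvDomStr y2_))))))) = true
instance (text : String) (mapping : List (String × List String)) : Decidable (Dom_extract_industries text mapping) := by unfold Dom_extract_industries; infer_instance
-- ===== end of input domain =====

-- B deduplicates the keywords, tests each distinct keyword once and selects industries by set membership (alternative decomposition; same results).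

-- ===== PORT A =====
-- literal port of A: early return on empty text, then one pass over the items,
-- appending the industry when any of its keywords is a substring of the text.
def extract_industries (text : String) (mapping : List (String × List String)) : List String :=
  if text = "" then []
  else
    mapping.foldl
      (fun found p => if p.2.any (fun k => PySem.Str.isIn k text) then found ++ [p.1] else found)
      []

-- ===== PORT B =====
-- literal port of Source B: dict.fromkeys-dedup of all keywords (PySem.List.dedup),
-- a set comprehension of the keywords found in text, then a filtering comprehension.
def extract_industries_alt (text : String) (mapping : List (String × List String)) : List String :=
  if text = "" then []
  else
    let distinct := PySem.List.dedup (mapping.flatMap (fun p => p.2))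
    let hit : PySem.Set String := PySem.Set.ofList (distinct.filter (fun k => PySem.Str.isIn k text))
    (mapping.filter (fun p => p.2.any (fun k => PySem.Set.contains hit k))).map (fun p => p.1)

-- ===== PRECONDITION & SPEC =====
def Spec_extract_industries (text : String) (mapping : List (String × List String)) (out : List String) : Prop := out = extract_industries_alt text mapping
instance (text : String) (mapping : List (String × List String)) (out : List String) : Decidable (Spec_extract_industries text mapping out) := by unfold Spec_extract_industries; infer_instance

-- ===== CLAIM (what is proved, stated in full; the proofs are below) =====
def Claim_equal_extract_industries : Prop := ∀ (text : String) (mapping : List (String × List String)), Dom_extract_industries text mapping → Spec_extract_industries text mapping (extract_industries text mapping)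

-- ===== LEMMAS AND PROOFS =====

-- membership in B's hit set is exactly "keyword occurs in text", for any keyword
-- that actually appears in the mapping
theorem contains_hit_eq_isIn (text : String) (mapping : List (String × List String))
    (k : String) (hk : k ∈ mapping.flatMap (fun p => p.2)) :
    PySem.Set.contains
      (PySem.Set.ofList ((PySem.List.dedup (mapping.flatMap (fun p => p.2))).filter
        (fun k => PySem.Str.isIn k text))) k
      = PySem.Str.isIn k text := by
  cases h : PySem.Chars.isIn k.toList text.toList with
  | true =>
    obtain ⟨p, hp, hkp⟩ := List.mem_flatMap.mp hk
    simp only [PySem.Set.contains_eq_listContains, List.contains_eq_mem, PySem.Set.mem_ofList,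
      List.mem_filter, PySem.List.mem_dedup, List.mem_flatMap]
    simp [h]
    exact ⟨p.1, p.2, hp, hkp⟩
  | false =>
    have : k ∉ (PySem.List.dedup (mapping.flatMap (fun p => p.2))).filter
        (fun k => PySem.Str.isIn k text) := by
      simp [List.mem_filter, h]
    simp [PySem.Set.contains_eq_listContains, List.contains_eq_mem, h, PySem.Set.mem_ofList]

-- ===== VERDICT (by name: the statement is the Claim_ definition above) =====
theorem extract_industries_spec : Claim_equal_extract_industries := by
  intro text mapping _
  unfold Spec_extract_industries extract_industries extract_industries_alt
  by_cases htext : text = ""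
  · simp [htext]
  · simp only [htext, ite_false]
    rw [PySem.List.foldl_append_if]
    simp only [List.nil_append]
    have : mapping.filter (fun p => p.2.any (fun k => PySem.Str.isIn k text))
        = mapping.filter (fun p => p.2.any (fun k =>
            PySem.Set.contains
              (PySem.Set.ofList ((PySem.List.dedup (mapping.flatMap (fun p => p.2))).filter
                (fun k => PySem.Str.isIn k text))) k)) := by
      apply List.filter_congr
      intro p hp
      apply PySem.List.any_congr_mem
      intro k hkp
      exact (contains_hit_eq_isIn text mapping k (List.mem_flatMap.mpr ⟨p, hp, hkp⟩)).symm
    rw [this]
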